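-- pv_equiv track=rewrite | github.com/appudeepika/MountbuleQuestions | 37 array rearrangement.py | move_negative_nmbrs
-- ===== SOURCE A (Python) =====
-- def move_negative_nmbrs(arr):
--     positive=[]
--     negative=[]
--     for i in arr:
--         if i>0:
--             positive.append(i)
--         else:
--             negative.append(i)
--     return positive+negative
-- ===== SOURCE B (Python) =====
-- def move_negative_nmbrs(arr):
--     # One stable sort: positives (key False) come first, non-positives (key True) after,
--     # each group keeping its original relative order.
--     return sorted(arr, key=lambda x: x <= 0)
-- ===== Notes on version B (the rewrite author's own statement) =====
-- stated objective: idiomatic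
-- what changed: Replaced the two explicit accumulator lists and final concatenation by a single stable sort on the boolean key x <= 0, letting sort stability produce the positives-then-rest order.
import Mathlib
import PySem

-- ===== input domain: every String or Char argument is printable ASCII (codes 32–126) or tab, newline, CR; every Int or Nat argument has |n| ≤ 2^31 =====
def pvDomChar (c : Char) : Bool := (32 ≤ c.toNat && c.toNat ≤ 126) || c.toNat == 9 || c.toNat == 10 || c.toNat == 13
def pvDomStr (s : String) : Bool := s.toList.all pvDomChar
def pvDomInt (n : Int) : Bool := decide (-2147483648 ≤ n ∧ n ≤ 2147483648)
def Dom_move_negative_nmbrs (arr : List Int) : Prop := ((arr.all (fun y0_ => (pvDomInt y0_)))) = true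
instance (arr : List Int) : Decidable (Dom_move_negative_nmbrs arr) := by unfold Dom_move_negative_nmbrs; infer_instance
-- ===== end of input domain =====

-- B replaces A's two-bucket accumulation by one stable sort on the boolean key x <= 0 (idiomatic; same output).

-- ===== PORT A =====
-- A: build 'positive' and 'negative' lists in one loop, return positive ++ negative.
def move_negative_nmbrs (arr : List Int) : List Int :=
  let acc := arr.foldl
    (fun (acc : List Int × List Int) i =>
      if i > 0 then (acc.1 ++ [i], acc.2) else (acc.1, acc.2 ++ [i]))
    ([], [])
  acc.1 ++ acc.2

-- ===== PORT B =====
-- B: sorted(arr, key=lambda x: x <= 0)  — stable sort, False (positives) before True.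
def move_negative_nmbrs_alt (arr : List Int) : List Int :=
  PySem.List.sorted arr (fun x => decide (x ≤ 0)) false

-- ===== PRECONDITION & SPEC =====
def Spec_move_negative_nmbrs (arr : List Int) (out : List Int) : Prop := out = move_negative_nmbrs_alt arr
instance (arr : List Int) (out : List Int) : Decidable (Spec_move_negative_nmbrs arr out) := by unfold Spec_move_negative_nmbrs; infer_instance

-- ===== CLAIM (what is proved, stated in full; the proofs are below) =====
def Claim_equal_move_negative_nmbrs : Prop := ∀ (arr : List Int), Dom_move_negative_nmbrs arr → Spec_move_negative_nmbrs arr (move_negative_nmbrs arr)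

-- ===== LEMMAS AND PROOFS =====

-- the comparator used by B's stable insertion sort, on the Bool key
def pvBefore (x y : Int) : Bool := decide ((decide (x ≤ 0) : Bool) < (decide (y ≤ 0) : Bool))

lemma pvBefore_true {x y : Int} (hx : x > 0) (hy : y ≤ 0) : pvBefore x y = true := by
  simp [pvBefore, Bool.lt_iff]; omega

lemma pvBefore_false_pos {x y : Int} (hx : x > 0) (hy : y > 0) : pvBefore x y = false := by
  simp [pvBefore, Bool.lt_iff]; omega

lemma pvBefore_false_left {x y : Int} (h0 : x ≤ 0) : pvBefore x y = false := by
  simp [pvBefore, Bool.lt_iff]; omega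

-- inserting a positive element into P ++ N (P all positive, N all non-positive) appends it to P
lemma insertBy_pos (x : Int) (P N : List Int) (hx : x > 0)
    (hP : ∀ p ∈ P, p > 0) (hN : ∀ n ∈ N, n ≤ 0) :
    PySem.List.insertBy pvBefore x (P ++ N) = (P ++ [x]) ++ N := by
  induction P with
  | nil =>
    cases N with
    | nil => simp [PySem.List.insertBy]
    | cons y ys =>
      simp only [List.nil_append]
      rw [PySem.List.insertBy, pvBefore_true hx (hN y (by simp))]
      simp
  | cons p ps ih =>
    simp only [List.cons_append]
    rw [PySem.List.insertBy, pvBefore_false_pos hx (hP p (by simp))]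
    rw [ih (fun q hq => hP q (by simp [hq]))]
    simp

-- inserting a non-positive element appends it at the very end
lemma insertBy_nonpos (x : Int) (L : List Int) (hx : x ≤ 0) :
    PySem.List.insertBy pvBefore x L = L ++ [x] := by
  induction L with
  | nil => simp [PySem.List.insertBy]
  | cons y ys ih =>
    rw [PySem.List.insertBy, pvBefore_false_left hx, ih]
    simp

-- the common invariant: folding either loop over xs starting from split state (P, N)
lemma main_inv (xs : List Int) (P N : List Int)
    (hP : ∀ p ∈ P, p > 0) (hN : ∀ n ∈ N, n ≤ 0) :
    (xs.foldl (fun (acc : List Int × List Int) i =>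
        if i > 0 then (acc.1 ++ [i], acc.2) else (acc.1, acc.2 ++ [i])) (P, N)).1 ++
    (xs.foldl (fun (acc : List Int × List Int) i =>
        if i > 0 then (acc.1 ++ [i], acc.2) else (acc.1, acc.2 ++ [i])) (P, N)).2 =
    xs.foldl (fun acc x => PySem.List.insertBy pvBefore x acc) (P ++ N) := by
  induction xs generalizing P N with
  | nil => simp
  | cons x xs ih =>
    simp only [List.foldl_cons]
    by_cases hx : x > 0
    · rw [if_pos hx, insertBy_pos x P N hx hP hN]
      exact ih (P ++ [x]) N
        (by intro p hp; rcases List.mem_append.mp hp with h | h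
            · exact hP p h
            · simpa using (List.mem_singleton.mp h) ▸ hx)
        hN
    · rw [if_neg hx]
      have hx' : x ≤ 0 := by omega
      rw [insertBy_nonpos x (P ++ N) hx', List.append_assoc]
      exact ih P (N ++ [x])
        hP
        (by intro n hn; rcases List.mem_append.mp hn with h | h
            · exact hN n h
            · simpa using (List.mem_singleton.mp h) ▸ hx')

-- ===== VERDICT (by name: the statement is the Claim_ definition above) =====
theorem move_negative_nmbrs_spec : Claim_equal_move_negative_nmbrs := by
  intro arr _
  show _ = _
  have h := main_inv arr [] [] (by simp) (by simp)
  simpa [move_negative_nmbrs, move_negative_nmbrs_alt, PySem.List.sorted, pvBefore] using h
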